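-- pv_equiv track=rewrite | github.com/arzoo0511/V2V-UniVoiceBot | mainBackup.py | correct_transcription
-- ===== SOURCE A (Python) =====
-- def correct_transcription(text):
--     corrections = {
--         "enforcers": "Infosys", "enforcer": "Infosys","in-courses": "Infosys", "in courses": "Infosys","infusions": "Infosys", "infusion": "Infosys",
--         "tdl": "TCS", "tdc": "TCS", "t d l": "TCS", "t d c": "TCS",
--         "natural data":"financial data", "natural data": "financial data", "natural data": "financial data",
--         "pharmacies": "pharmaceuticals", "pharmacy": "pharmaceuticals",
--     }
--     lower_text = text.lower()
--     for wrong, right in corrections.items():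
--         if wrong in lower_text:
--             lower_text = lower_text.replace(wrong, right)
--     return lower_text.capitalize()
-- ===== SOURCE B (Python) =====
-- def correct_transcription(text):
--     corrections = {
--         "enforcers": "Infosys", "enforcer": "Infosys", "in-courses": "Infosys", "in courses": "Infosys",
--         "infusions": "Infosys", "infusion": "Infosys",
--         "tdl": "TCS", "tdc": "TCS", "t d l": "TCS", "t d c": "TCS",
--         "natural data": "financial data",
--         "pharmacies": "pharmaceuticals", "pharmacy": "pharmaceuticals",
--     }
--     pairs = sorted(corrections.items(), key=lambda kv: len(kv[0]), reverse=True)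
--     s = text.lower()
--     out = []
--     i = 0
--     while i < len(s):
--         for wrong, right in pairs:
--             if s.startswith(wrong, i):
--                 out.append(right)
--                 i += len(wrong)
--                 break
--         else:
--             out.append(s[i])
--             i += 1
--     return "".join(out).capitalize()
-- ===== Notes on version B (the rewrite author's own statement) =====
-- stated objective: alternative
-- what changed: A makes 13 sequential full-string str.replace passes in dict order; B lowercases once and does a single left-to-right scan that at each position tries the correction keys longest-first, emitting the replacement and skipping the key on a match, so the text is traversed once.
import Mathlib
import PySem

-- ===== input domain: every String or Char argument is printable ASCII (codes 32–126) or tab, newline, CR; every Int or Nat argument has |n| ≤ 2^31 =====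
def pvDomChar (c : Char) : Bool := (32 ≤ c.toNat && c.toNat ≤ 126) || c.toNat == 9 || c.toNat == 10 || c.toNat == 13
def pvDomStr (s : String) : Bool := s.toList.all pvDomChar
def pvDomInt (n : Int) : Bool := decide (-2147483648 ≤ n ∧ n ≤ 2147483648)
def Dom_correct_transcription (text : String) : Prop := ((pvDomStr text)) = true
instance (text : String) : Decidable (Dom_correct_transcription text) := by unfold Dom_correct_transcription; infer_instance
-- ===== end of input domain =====

-- B replaces A's 13 sequential full-string str.replace passes by ONE left-to-right scan that
-- matches the correction keys longest-first at each position (same return value; no side effects).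

-- ===== PORT A =====
-- str.capitalize(): first char upper-cased, the rest lower-cased — hand port, exact on the ASCII domain
def pvCapChars : List Char → List Char
  | [] => []
  | c :: t => PySem.Chars.upperChar c :: PySem.Chars.lower t

def pvCapStr (s : String) : String := String.ofList (pvCapChars s.toList)

-- the dict literal of A, duplicate "natural data" keys included (dict keeps first position, last value)
def pvAPairs : List (String × String) := [
 ("enforcers","Infosys"), ("enforcer","Infosys"), ("in-courses","Infosys"), ("in courses","Infosys"),
 ("infusions","Infosys"), ("infusion","Infosys"),
 ("tdl","TCS"), ("tdc","TCS"), ("t d l","TCS"), ("t d c","TCS"),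
 ("natural data","financial data"), ("natural data","financial data"), ("natural data","financial data"),
 ("pharmacies","pharmaceuticals"), ("pharmacy","pharmaceuticals")]

def correct_transcription (text : String) : String :=
  let corrections := PySem.Dict.ofList pvAPairs
  let lower_text := PySem.Str.lower text
  let result := corrections.items.foldl
    (fun lt kv => if PySem.Str.isIn kv.1 lt then PySem.Str.replace lt kv.1 kv.2 else lt) lower_text
  pvCapStr result

-- ===== PORT B =====
-- the dict literal of Source B (no duplicate keys)
def pvBPairs : List (String × String) := [
 ("enforcers","Infosys"), ("enforcer","Infosys"), ("in-courses","Infosys"), ("in courses","Infosys"),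
 ("infusions","Infosys"), ("infusion","Infosys"),
 ("tdl","TCS"), ("tdc","TCS"), ("t d l","TCS"), ("t d c","TCS"),
 ("natural data","financial data"),
 ("pharmacies","pharmaceuticals"), ("pharmacy","pharmaceuticals")]

-- Source B's while-loop with the inner for/break: at each position the first (longest-first) key that
-- matches is replaced and skipped, otherwise the character is copied.  (All keys are nonempty, so
-- consuming `p.1.length` characters on a match is what Source B's `i += len(wrong)` does.)
def pvScan (ps : List (List Char × List Char)) : List Char → List Char
  | [] => []
  | c :: t =>
    match ps.find? (fun p => p.1.isPrefixOf (c :: t)) with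
    | some p => p.2 ++ pvScan ps (t.drop (p.1.length - 1))
    | none => c :: pvScan ps t
termination_by s => s.length
decreasing_by
  · simpa using Nat.lt_succ_of_le (List.length_drop_le _ _)
  · simp

def correct_transcription_alt (text : String) : String :=
  let corrections := PySem.Dict.ofList pvBPairs
  let pairs := PySem.List.sorted corrections.items (fun kv => PySem.Str.len kv.1) true
  let s := PySem.Str.lower text
  pvCapStr (String.ofList (pvScan (pairs.map (fun kv => (kv.1.toList, kv.2.toList))) s.toList))

-- ===== PRECONDITION & SPEC =====
def Spec_correct_transcription (text : String) (out : String) : Prop := out = correct_transcription_alt text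
instance (text : String) (out : String) : Decidable (Spec_correct_transcription text out) := by unfold Spec_correct_transcription; infer_instance

-- ===== CLAIM (what is proved, stated in full; the proofs are below) =====
def Claim_equal_correct_transcription : Prop := ∀ (text : String), Dom_correct_transcription text → Spec_correct_transcription text (correct_transcription text)

-- ===== LEMMAS AND PROOFS =====

-- A single-key replace pass (the structural core of PySem.Chars.replace for a nonempty key)
def pvRepl (k r : List Char) : List Char → List Char
  | [] => []
  | c :: t => if k.isPrefixOf (c :: t) then r ++ pvRepl k r (t.drop (k.length - 1)) else c :: pvRepl k r t
termination_by s => s.length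
decreasing_by
  · simpa using Nat.lt_succ_of_le (List.length_drop_le _ _)
  · simp

-- "the two lists could match at overlapping positions": one is a prefix of the other
abbrev pvC (a b : List Char) : Prop := a <+: b ∨ b <+: a

theorem pvRepl_nil (k r : List Char) : pvRepl k r [] = [] := by
  simp [pvRepl]

theorem pvRepl_pos {k : List Char} (r : List Char) {s : List Char}
    (hk : k ≠ []) (h : k <+: s) (hs : s ≠ []) :
    pvRepl k r s = r ++ pvRepl k r (s.drop k.length) := by
  cases s with
  | nil => exact absurd rfl hs
  | cons c t =>
    rw [pvRepl, if_pos (List.isPrefixOf_iff_prefix.mpr h)]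
    obtain ⟨m, hm⟩ : ∃ m, k.length = m + 1 :=
      ⟨k.length - 1, (Nat.succ_pred_eq_of_pos (List.length_pos_of_ne_nil hk)).symm⟩
    simp [hm]

theorem pvRepl_neg {k : List Char} (r : List Char) {c : Char} {t : List Char}
    (h : ¬ k <+: (c :: t)) :
    pvRepl k r (c :: t) = c :: pvRepl k r t := by
  rw [pvRepl, if_neg (by simpa [List.isPrefixOf_iff_prefix] using h)]

theorem pvScan_nil (ps : List (List Char × List Char)) : pvScan ps [] = [] := by
  simp [pvScan]

theorem pvScan_some {ps : List (List Char × List Char)} {s : List Char}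
    {p : List Char × List Char}
    (hs : s ≠ []) (h : ps.find? (fun p => p.1.isPrefixOf s) = some p) (hp : p.1 ≠ []) :
    pvScan ps s = p.2 ++ pvScan ps (s.drop p.1.length) := by
  cases s with
  | nil => exact absurd rfl hs
  | cons c t =>
    rw [pvScan, h]
    obtain ⟨m, hm⟩ : ∃ m, p.1.length = m + 1 :=
      ⟨p.1.length - 1, (Nat.succ_pred_eq_of_pos (List.length_pos_of_ne_nil hp)).symm⟩
    simp [hm]

theorem pvScan_none {ps : List (List Char × List Char)} {c : Char} {t : List Char}
    (h : ps.find? (fun p => p.1.isPrefixOf (c :: t)) = none) :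
    pvScan ps (c :: t) = c :: pvScan ps t := by
  rw [pvScan, h]

-- pvRepl is PySem.Chars.replace for a nonempty pattern
theorem pvRepl_go (k r : List Char) (hk : k ≠ []) :
    ∀ fuel l acc, l.length ≤ fuel →
      PySem.Chars.replace.go k r fuel l acc = acc.reverse ++ pvRepl k r l := by
  intro fuel
  induction fuel with
  | zero =>
    intro l acc hl
    have : l = [] := List.eq_nil_of_length_eq_zero (Nat.le_zero.mp hl)
    subst this
    simp [PySem.Chars.replace.go, pvRepl_nil]
  | succ n ih =>
    intro l acc hl
    cases l with
    | nil => simp [PySem.Chars.replace.go, pvRepl_nil]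
    | cons c t =>
      by_cases hpre : k <+: (c :: t)
      · rw [PySem.Chars.replace.go]
        rw [if_pos (List.isPrefixOf_iff_prefix.mpr hpre)]
        have hklen : 0 < k.length := List.length_pos_of_ne_nil hk
        have hd : ((c :: t).drop k.length).length ≤ n := by
          simp only [List.length_drop, List.length_cons] at *
          omega
        rw [ih _ _ hd, pvRepl_pos r hk hpre (by simp)]
        simp
      · rw [PySem.Chars.replace.go]
        rw [if_neg (by simpa [List.isPrefixOf_iff_prefix] using hpre)]
        rw [ih t (c :: acc) (by simpa using Nat.le_of_succ_le_succ (by simpa using hl))]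
        rw [pvRepl_neg r hpre]
        simp

theorem pvRepl_eq_replace (k r : List Char) (hk : k ≠ []) (s : List Char) :
    PySem.Chars.replace s k r = pvRepl k r s := by
  rw [PySem.Chars.replace, if_neg (by simpa [List.isEmpty_iff] using hk)]
  simpa using pvRepl_go k r hk s.length s [] le_rfl

-- a pass over a string that does not contain the key is the identity
theorem pvRepl_of_not_infix {k r : List Char} : ∀ {s : List Char}, ¬ k <:+: s → pvRepl k r s = s := by
  intro s
  induction s with
  | nil => intro _; exact pvRepl_nil k r
  | cons c t ih =>
    intro h
    rw [pvRepl_neg r (fun hp => h hp.isInfix)]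
    rw [ih (fun hi => h (hi.trans (List.suffix_cons c t).isInfix))]

-- pvRepl distributes over an append when no match starts inside the left part
theorem pvRepl_append {k r : List Char} : ∀ (a b : List Char),
    (∀ i < a.length, ¬ k <+: (a.drop i ++ b)) →
    pvRepl k r (a ++ b) = a ++ pvRepl k r b := by
  intro a
  induction a with
  | nil => intro b _; simp
  | cons c a ih =>
    intro b h
    have h0 : ¬ k <+: (c :: (a ++ b)) := by simpa using h 0 (by simp)
    rw [List.cons_append, pvRepl_neg r h0,
      ih b (fun i hi => by simpa using h (i + 1) (by simpa using hi))]
    simp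

-- pvScan copies a block verbatim when no key matches starting inside it
theorem pvScan_copy {ps : List (List Char × List Char)} : ∀ (a b : List Char),
    (∀ i < a.length, ∀ p ∈ ps, ¬ p.1 <+: (a.drop i ++ b)) →
    pvScan ps (a ++ b) = a ++ pvScan ps b := by
  intro a
  induction a with
  | nil => intro b _; simp
  | cons c a ih =>
    intro b h
    have h0 : ps.find? (fun p => p.1.isPrefixOf (c :: (a ++ b))) = none := by
      rw [List.find?_eq_none]
      intro p hp
      simpa [List.isPrefixOf_iff_prefix] using h 0 (by simp) p hp
    rw [List.cons_append, pvScan_none h0,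
      ih b (fun i hi p hp => by simpa using h (i + 1) (by simpa using hi) p hp)]
    simp

-- any match in the output of a pvRepl pass is an old match or runs into a copy of r
theorem pvMatch_repl {k r : List Char} (hk : k ≠ []) :
    ∀ n s, s.length ≤ n → ∀ p, p <+: pvRepl k r s →
      p <+: s ∨ ∃ j < p.length, pvC (p.drop j) r := by
  intro n
  induction n with
  | zero =>
    intro s hs p hp
    have : s = [] := List.eq_nil_of_length_eq_zero (Nat.le_zero.mp hs)
    subst this
    rw [pvRepl_nil] at hp
    exact Or.inl hp
  | succ n ih =>
    intro s hs p hp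
    cases s with
    | nil => rw [pvRepl_nil] at hp; exact Or.inl hp
    | cons c t =>
      by_cases hpre : k <+: (c :: t)
      · rw [pvRepl_pos r hk hpre (by simp)] at hp
        rcases p with _ | ⟨c', p'⟩
        · exact Or.inl (List.nil_prefix)
        · refine Or.inr ⟨0, by simp, ?_⟩
          simpa [pvC] using List.prefix_or_prefix_of_prefix hp (List.prefix_append r _)
      · rw [pvRepl_neg r hpre] at hp
        rcases p with _ | ⟨c', p'⟩
        · exact Or.inl (List.nil_prefix)
        · rw [List.cons_prefix_cons] at hp
          obtain ⟨rfl, hp'⟩ := hp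
          rcases ih t (by simpa using Nat.le_of_succ_le_succ (by simpa using hs)) p' hp' with h | ⟨j, hj, hc⟩
          · exact Or.inl (List.cons_prefix_cons.mpr ⟨rfl, h⟩)
          · exact Or.inr ⟨j + 1, by simpa using Nat.succ_lt_succ hj, by simpa using hc⟩

theorem pvScan_nil_keys : ∀ s : List Char, pvScan [] s = s := by
  intro s
  induction s with
  | nil => exact pvScan_nil []
  | cons c t ih => rw [pvScan_none (by simp)]; rw [ih]

-- find? skips a non-matching element in the middle
theorem pvFind_middle {α : Type} (q : α → Bool) (x : α) (hx : ¬ q x = true) :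
    ∀ (l1 l2 : List α), (l1 ++ x :: l2).find? q = (l1 ++ l2).find? q := by
  intro l1 l2
  induction l1 with
  | nil => simp [List.find?_cons_of_neg hx]
  | cons a l1 ih =>
    by_cases ha : q a = true
    · simp [List.find?_cons_of_pos ha]
    · simpa [List.find?_cons_of_neg ha] using ih

-- the first element satisfying q also comes first for a predicate implying q
theorem pvFind_mono {α : Type} (q q' : α → Bool) :
    ∀ (l : List α) (p₀ : α), l.find? q = some p₀ → q' p₀ = true →
      (∀ p ∈ l, q' p = true → q p = true) → l.find? q' = some p₀ := by
  intro l
  induction l with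
  | nil => intro p₀ h; simp at h
  | cons a l ih =>
    intro p₀ h hq' himp
    by_cases ha : q a = true
    · rw [List.find?_cons_of_pos ha] at h
      obtain rfl : a = p₀ := by simpa using h
      rw [List.find?_cons_of_pos hq']
    · rw [List.find?_cons_of_neg ha] at h
      have ha' : ¬ q' a = true := fun h' => ha (himp a (by simp) h')
      rw [List.find?_cons_of_neg ha']
      exact ih p₀ h hq' (fun p hp => himp p (by simp [hp]))

-- THE FUSION LEMMA: peeling the first key of A's chain off the combined scan list.
theorem pvFuse (k r : List Char) (L1 L2 : List (List Char × List Char))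
    (hk : k ≠ []) (hr : r ≠ [])
    (hne : ∀ p ∈ L1 ++ L2, p.1 ≠ [])
    (hL1 : ∀ p ∈ L1, ¬ pvC p.1 k)
    (hov : ∀ p ∈ L1 ++ L2, ∀ j ∈ List.range p.1.length, 0 < j → ¬ pvC k (p.1.drop j))
    (hr1 : ∀ p ∈ L1 ++ L2, ∀ i ∈ List.range r.length, ¬ pvC p.1 (r.drop i))
    (hr2 : ∀ p ∈ L1 ++ L2, ∀ j ∈ List.range p.1.length, 0 < j → ¬ pvC (p.1.drop j) r) :
    ∀ s, pvScan (L1 ++ (k, r) :: L2) s = pvScan (L1 ++ L2) (pvRepl k r s) := by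
  suffices H : ∀ n s, s.length ≤ n →
      pvScan (L1 ++ (k, r) :: L2) s = pvScan (L1 ++ L2) (pvRepl k r s) by
    intro s; exact H s.length s le_rfl
  intro n
  induction n with
  | zero =>
    intro s hs
    have : s = [] := List.eq_nil_of_length_eq_zero (Nat.le_zero.mp hs)
    subst this
    rw [pvRepl_nil, pvScan_nil, pvScan_nil]
  | succ n ih =>
    intro s hs
    cases s with
    | nil => rw [pvRepl_nil, pvScan_nil, pvScan_nil]
    | cons c t =>
      have hslen : t.length ≤ n := by simpa using Nat.le_of_succ_le_succ (by simpa using hs)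
      by_cases hks : k <+: (c :: t)
      · -- A's key matches here: both sides replace it by r
        have hfind : (L1 ++ (k, r) :: L2).find? (fun p => p.1.isPrefixOf (c :: t))
            = some (k, r) := by
          have h1 : L1.find? (fun p => p.1.isPrefixOf (c :: t)) = none := by
            rw [List.find?_eq_none]
            intro p hp
            simp only [List.isPrefixOf_iff_prefix, Bool.not_eq_true, decide_eq_false_iff_not]
            intro hpre
            exact hL1 p hp (List.prefix_or_prefix_of_prefix hpre hks)
          rw [List.find?_append, h1, Option.none_or,
            List.find?_cons_of_pos (by simpa [List.isPrefixOf_iff_prefix] using hks)]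
        rw [pvScan_some (by simp) hfind hk]
        rw [pvRepl_pos r hk hks (by simp)]
        rw [pvScan_copy r (pvRepl k r ((c :: t).drop k.length)) ?hcopy]
        case hcopy =>
          intro i hi p hp hpre
          exact hr1 p hp i (List.mem_range.mpr hi)
            (List.prefix_or_prefix_of_prefix hpre (List.prefix_append _ _))
        have hd : ((c :: t).drop k.length).length ≤ n := by
          have : 0 < k.length := List.length_pos_of_ne_nil hk
          simp only [List.length_drop, List.length_cons]
          omega
        rw [ih _ hd]
      · -- A's key does not match at this position
        rcases h0 : (L1 ++ L2).find? (fun p => p.1.isPrefixOf (c :: t)) with _ | p₀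
        · -- no key matches: both sides copy the character
          have hfindL : (L1 ++ (k, r) :: L2).find? (fun p => p.1.isPrefixOf (c :: t)) = none := by
            rw [pvFind_middle _ _ (by simpa [List.isPrefixOf_iff_prefix] using hks), h0]
          rw [pvScan_none hfindL, pvRepl_neg r hks]
          have hfind2 : (L1 ++ L2).find? (fun p => p.1.isPrefixOf (c :: pvRepl k r t)) = none := by
            rw [List.find?_eq_none]
            intro p hp
            simp only [List.isPrefixOf_iff_prefix, Bool.not_eq_true, decide_eq_false_iff_not]
            intro hpre
            rw [← pvRepl_neg r hks] at hpre
            rcases pvMatch_repl hk (c :: t).length (c :: t) le_rfl p.1 hpre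
              with h | ⟨j, hj, hc⟩
            · exact absurd (by simpa [List.isPrefixOf_iff_prefix] using h)
                (by simpa using List.find?_eq_none.mp h0 p hp)
            · have hjlen : j < p.1.length := hj
              rcases Nat.eq_zero_or_pos j with rfl | hjpos
              · exact hr1 p hp 0 (List.mem_range.mpr (List.length_pos_of_ne_nil hr))
                  (by simpa using hc)
              · exact hr2 p hp j (List.mem_range.mpr hjlen) hjpos hc
          rw [pvScan_none hfind2, ih t hslen]
        · -- another key p₀ matches first: both sides replace it and continue
          have hp₀mem : p₀ ∈ L1 ++ L2 := List.mem_of_find?_eq_some h0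
          have hp₀pre : p₀.1 <+: (c :: t) := by
            simpa [List.isPrefixOf_iff_prefix] using List.find?_some h0
          have hp₀ne : p₀.1 ≠ [] := hne p₀ hp₀mem
          have hp₀len : 0 < p₀.1.length := List.length_pos_of_ne_nil hp₀ne
          obtain ⟨b, hb⟩ := hp₀pre
          have hfindL : (L1 ++ (k, r) :: L2).find? (fun p => p.1.isPrefixOf (c :: t))
              = some p₀ := by
            rw [pvFind_middle _ _ (by simpa [List.isPrefixOf_iff_prefix] using hks), h0]
          rw [pvScan_some (by simp) hfindL hp₀ne]
          -- the replace pass copies p₀'s occurrence verbatim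
          have hno : ∀ i < p₀.1.length, ¬ k <+: (p₀.1.drop i ++ b) := by
            intro i hi hkpre
            rcases Nat.eq_zero_or_pos i with rfl | hipos
            · rw [List.drop_zero, hb] at hkpre; exact hks hkpre
            · exact hov p₀ hp₀mem i (List.mem_range.mpr hi) hipos
                (List.prefix_or_prefix_of_prefix hkpre (List.prefix_append _ _))
          have hsplit : pvRepl k r (c :: t) = p₀.1 ++ pvRepl k r b := by
            rw [← hb]; exact pvRepl_append p₀.1 b hno
          rw [hsplit]
          have himp : ∀ p ∈ L1 ++ L2,
              p.1 <+: (p₀.1 ++ pvRepl k r b) → p.1 <+: (c :: t) := by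
            intro p hp hpre
            rcases List.prefix_or_prefix_of_prefix hpre (List.prefix_append p₀.1 _)
              with h | h
            · exact h.trans (hb ▸ List.prefix_append p₀.1 b)
            · obtain ⟨d, hd⟩ := h
              have hdpre : d <+: pvRepl k r b := by
                refine (List.prefix_append_right_inj p₀.1).mp ?_
                rw [hd]; exact hpre
              rcases pvMatch_repl hk b.length b le_rfl d hdpre with h2 | ⟨j, hj, hc⟩
              · rw [← hd, ← hb]
                exact (List.prefix_append_right_inj p₀.1).mpr h2
              · exfalso
                have hplen : p.1.length = p₀.1.length + d.length := by
                  rw [← hd]; simp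
                have hcc : pvC (p.1.drop (p₀.1.length + j)) r := by
                  rw [← hd]
                  have hnil : List.drop (p₀.1.length + j) p₀.1 = [] :=
                    List.drop_eq_nil_of_le (by omega)
                  simpa [List.drop_append, hnil] using hc
                exact hr2 p hp (p₀.1.length + j)
                  (List.mem_range.mpr (by omega)) (by omega) hcc
          have hfind2 : (L1 ++ L2).find? (fun p => p.1.isPrefixOf (p₀.1 ++ pvRepl k r b))
              = some p₀ := by
            refine pvFind_mono _ _ _ p₀ h0 ?_ ?_
            · simpa [List.isPrefixOf_iff_prefix] using List.prefix_append p₀.1 (pvRepl k r b)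
            · intro p hp hq'
              simpa [List.isPrefixOf_iff_prefix] using
                himp p hp (by simpa [List.isPrefixOf_iff_prefix] using hq')
          rw [pvScan_some (by simp [hp₀ne]) hfind2 hp₀ne]
          rw [List.drop_left]
          have hblen : b.length ≤ n := by
            have := congrArg List.length hb
            simp only [List.length_append, List.length_cons] at this
            omega
          have hdropb : (c :: t).drop p₀.1.length = b := by
            rw [← hb, List.drop_left]
          rw [hdropb, ih b hblen]


theorem pvStep1 : ∀ s, pvScan [("natural data".toList, "financial data".toList), ("in-courses".toList, "Infosys".toList), ("in courses".toList, "Infosys".toList), ("pharmacies".toList, "pharmaceuticals".toList), ("enforcers".toList, "Infosys".toList), ("infusions".toList, "Infosys".toList), ("enforcer".toList, "Infosys".toList), ("infusion".toList, "Infosys".toList), ("pharmacy".toList, "pharmaceuticals".toList), ("t d l".toList, "TCS".toList), ("t d c".toList, "TCS".toList), ("tdl".toList, "TCS".toList), ("tdc".toList, "TCS".toList)] s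
    = pvScan [("natural data".toList, "financial data".toList), ("in-courses".toList, "Infosys".toList), ("in courses".toList, "Infosys".toList), ("pharmacies".toList, "pharmaceuticals".toList), ("infusions".toList, "Infosys".toList), ("enforcer".toList, "Infosys".toList), ("infusion".toList, "Infosys".toList), ("pharmacy".toList, "pharmaceuticals".toList), ("t d l".toList, "TCS".toList), ("t d c".toList, "TCS".toList), ("tdl".toList, "TCS".toList), ("tdc".toList, "TCS".toList)] (pvRepl "enforcers".toList "Infosys".toList s) := by
  intro s
  have h := pvFuse "enforcers".toList "Infosys".toList [("natural data".toList, "financial data".toList), ("in-courses".toList, "Infosys".toList), ("in courses".toList, "Infosys".toList), ("pharmacies".toList, "pharmaceuticals".toList)] [("infusions".toList, "Infosys".toList), ("enforcer".toList, "Infosys".toList), ("infusion".toList, "Infosys".toList), ("pharmacy".toList, "pharmaceuticals".toList), ("t d l".toList, "TCS".toList), ("t d c".toList, "TCS".toList), ("tdl".toList, "TCS".toList), ("tdc".toList, "TCS".toList)]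
    (by decide) (by decide) (by decide) (by decide) (by decide) (by decide) (by decide) s
  simpa only [List.cons_append, List.nil_append] using h

theorem pvStep2 : ∀ s, pvScan [("natural data".toList, "financial data".toList), ("in-courses".toList, "Infosys".toList), ("in courses".toList, "Infosys".toList), ("pharmacies".toList, "pharmaceuticals".toList), ("infusions".toList, "Infosys".toList), ("enforcer".toList, "Infosys".toList), ("infusion".toList, "Infosys".toList), ("pharmacy".toList, "pharmaceuticals".toList), ("t d l".toList, "TCS".toList), ("t d c".toList, "TCS".toList), ("tdl".toList, "TCS".toList), ("tdc".toList, "TCS".toList)] s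
    = pvScan [("natural data".toList, "financial data".toList), ("in-courses".toList, "Infosys".toList), ("in courses".toList, "Infosys".toList), ("pharmacies".toList, "pharmaceuticals".toList), ("infusions".toList, "Infosys".toList), ("infusion".toList, "Infosys".toList), ("pharmacy".toList, "pharmaceuticals".toList), ("t d l".toList, "TCS".toList), ("t d c".toList, "TCS".toList), ("tdl".toList, "TCS".toList), ("tdc".toList, "TCS".toList)] (pvRepl "enforcer".toList "Infosys".toList s) := by
  intro s
  have h := pvFuse "enforcer".toList "Infosys".toList [("natural data".toList, "financial data".toList), ("in-courses".toList, "Infosys".toList), ("in courses".toList, "Infosys".toList), ("pharmacies".toList, "pharmaceuticals".toList), ("infusions".toList, "Infosys".toList)] [("infusion".toList, "Infosys".toList), ("pharmacy".toList, "pharmaceuticals".toList), ("t d l".toList, "TCS".toList), ("t d c".toList, "TCS".toList), ("tdl".toList, "TCS".toList), ("tdc".toList, "TCS".toList)]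
    (by decide) (by decide) (by decide) (by decide) (by decide) (by decide) (by decide) s
  simpa only [List.cons_append, List.nil_append] using h

theorem pvStep3 : ∀ s, pvScan [("natural data".toList, "financial data".toList), ("in-courses".toList, "Infosys".toList), ("in courses".toList, "Infosys".toList), ("pharmacies".toList, "pharmaceuticals".toList), ("infusions".toList, "Infosys".toList), ("infusion".toList, "Infosys".toList), ("pharmacy".toList, "pharmaceuticals".toList), ("t d l".toList, "TCS".toList), ("t d c".toList, "TCS".toList), ("tdl".toList, "TCS".toList), ("tdc".toList, "TCS".toList)] s
    = pvScan [("natural data".toList, "financial data".toList), ("in courses".toList, "Infosys".toList), ("pharmacies".toList, "pharmaceuticals".toList), ("infusions".toList, "Infosys".toList), ("infusion".toList, "Infosys".toList), ("pharmacy".toList, "pharmaceuticals".toList), ("t d l".toList, "TCS".toList), ("t d c".toList, "TCS".toList), ("tdl".toList, "TCS".toList), ("tdc".toList, "TCS".toList)] (pvRepl "in-courses".toList "Infosys".toList s) := by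
  intro s
  have h := pvFuse "in-courses".toList "Infosys".toList [("natural data".toList, "financial data".toList)] [("in courses".toList, "Infosys".toList), ("pharmacies".toList, "pharmaceuticals".toList), ("infusions".toList, "Infosys".toList), ("infusion".toList, "Infosys".toList), ("pharmacy".toList, "pharmaceuticals".toList), ("t d l".toList, "TCS".toList), ("t d c".toList, "TCS".toList), ("tdl".toList, "TCS".toList), ("tdc".toList, "TCS".toList)]
    (by decide) (by decide) (by decide) (by decide) (by decide) (by decide) (by decide) s
  simpa only [List.cons_append, List.nil_append] using h

theorem pvStep4 : ∀ s, pvScan [("natural data".toList, "financial data".toList), ("in courses".toList, "Infosys".toList), ("pharmacies".toList, "pharmaceuticals".toList), ("infusions".toList, "Infosys".toList), ("infusion".toList, "Infosys".toList), ("pharmacy".toList, "pharmaceuticals".toList), ("t d l".toList, "TCS".toList), ("t d c".toList, "TCS".toList), ("tdl".toList, "TCS".toList), ("tdc".toList, "TCS".toList)] s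
    = pvScan [("natural data".toList, "financial data".toList), ("pharmacies".toList, "pharmaceuticals".toList), ("infusions".toList, "Infosys".toList), ("infusion".toList, "Infosys".toList), ("pharmacy".toList, "pharmaceuticals".toList), ("t d l".toList, "TCS".toList), ("t d c".toList, "TCS".toList), ("tdl".toList, "TCS".toList), ("tdc".toList, "TCS".toList)] (pvRepl "in courses".toList "Infosys".toList s) := by
  intro s
  have h := pvFuse "in courses".toList "Infosys".toList [("natural data".toList, "financial data".toList)] [("pharmacies".toList, "pharmaceuticals".toList), ("infusions".toList, "Infosys".toList), ("infusion".toList, "Infosys".toList), ("pharmacy".toList, "pharmaceuticals".toList), ("t d l".toList, "TCS".toList), ("t d c".toList, "TCS".toList), ("tdl".toList, "TCS".toList), ("tdc".toList, "TCS".toList)]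
    (by decide) (by decide) (by decide) (by decide) (by decide) (by decide) (by decide) s
  simpa only [List.cons_append, List.nil_append] using h

theorem pvStep5 : ∀ s, pvScan [("natural data".toList, "financial data".toList), ("pharmacies".toList, "pharmaceuticals".toList), ("infusions".toList, "Infosys".toList), ("infusion".toList, "Infosys".toList), ("pharmacy".toList, "pharmaceuticals".toList), ("t d l".toList, "TCS".toList), ("t d c".toList, "TCS".toList), ("tdl".toList, "TCS".toList), ("tdc".toList, "TCS".toList)] s
    = pvScan [("natural data".toList, "financial data".toList), ("pharmacies".toList, "pharmaceuticals".toList), ("infusion".toList, "Infosys".toList), ("pharmacy".toList, "pharmaceuticals".toList), ("t d l".toList, "TCS".toList), ("t d c".toList, "TCS".toList), ("tdl".toList, "TCS".toList), ("tdc".toList, "TCS".toList)] (pvRepl "infusions".toList "Infosys".toList s) := by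
  intro s
  have h := pvFuse "infusions".toList "Infosys".toList [("natural data".toList, "financial data".toList), ("pharmacies".toList, "pharmaceuticals".toList)] [("infusion".toList, "Infosys".toList), ("pharmacy".toList, "pharmaceuticals".toList), ("t d l".toList, "TCS".toList), ("t d c".toList, "TCS".toList), ("tdl".toList, "TCS".toList), ("tdc".toList, "TCS".toList)]
    (by decide) (by decide) (by decide) (by decide) (by decide) (by decide) (by decide) s
  simpa only [List.cons_append, List.nil_append] using h

theorem pvStep6 : ∀ s, pvScan [("natural data".toList, "financial data".toList), ("pharmacies".toList, "pharmaceuticals".toList), ("infusion".toList, "Infosys".toList), ("pharmacy".toList, "pharmaceuticals".toList), ("t d l".toList, "TCS".toList), ("t d c".toList, "TCS".toList), ("tdl".toList, "TCS".toList), ("tdc".toList, "TCS".toList)] s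
    = pvScan [("natural data".toList, "financial data".toList), ("pharmacies".toList, "pharmaceuticals".toList), ("pharmacy".toList, "pharmaceuticals".toList), ("t d l".toList, "TCS".toList), ("t d c".toList, "TCS".toList), ("tdl".toList, "TCS".toList), ("tdc".toList, "TCS".toList)] (pvRepl "infusion".toList "Infosys".toList s) := by
  intro s
  have h := pvFuse "infusion".toList "Infosys".toList [("natural data".toList, "financial data".toList), ("pharmacies".toList, "pharmaceuticals".toList)] [("pharmacy".toList, "pharmaceuticals".toList), ("t d l".toList, "TCS".toList), ("t d c".toList, "TCS".toList), ("tdl".toList, "TCS".toList), ("tdc".toList, "TCS".toList)]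
    (by decide) (by decide) (by decide) (by decide) (by decide) (by decide) (by decide) s
  simpa only [List.cons_append, List.nil_append] using h

theorem pvStep7 : ∀ s, pvScan [("natural data".toList, "financial data".toList), ("pharmacies".toList, "pharmaceuticals".toList), ("pharmacy".toList, "pharmaceuticals".toList), ("t d l".toList, "TCS".toList), ("t d c".toList, "TCS".toList), ("tdl".toList, "TCS".toList), ("tdc".toList, "TCS".toList)] s
    = pvScan [("natural data".toList, "financial data".toList), ("pharmacies".toList, "pharmaceuticals".toList), ("pharmacy".toList, "pharmaceuticals".toList), ("t d l".toList, "TCS".toList), ("t d c".toList, "TCS".toList), ("tdc".toList, "TCS".toList)] (pvRepl "tdl".toList "TCS".toList s) := by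
  intro s
  have h := pvFuse "tdl".toList "TCS".toList [("natural data".toList, "financial data".toList), ("pharmacies".toList, "pharmaceuticals".toList), ("pharmacy".toList, "pharmaceuticals".toList), ("t d l".toList, "TCS".toList), ("t d c".toList, "TCS".toList)] [("tdc".toList, "TCS".toList)]
    (by decide) (by decide) (by decide) (by decide) (by decide) (by decide) (by decide) s
  simpa only [List.cons_append, List.nil_append] using h

theorem pvStep8 : ∀ s, pvScan [("natural data".toList, "financial data".toList), ("pharmacies".toList, "pharmaceuticals".toList), ("pharmacy".toList, "pharmaceuticals".toList), ("t d l".toList, "TCS".toList), ("t d c".toList, "TCS".toList), ("tdc".toList, "TCS".toList)] s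
    = pvScan [("natural data".toList, "financial data".toList), ("pharmacies".toList, "pharmaceuticals".toList), ("pharmacy".toList, "pharmaceuticals".toList), ("t d l".toList, "TCS".toList), ("t d c".toList, "TCS".toList)] (pvRepl "tdc".toList "TCS".toList s) := by
  intro s
  have h := pvFuse "tdc".toList "TCS".toList [("natural data".toList, "financial data".toList), ("pharmacies".toList, "pharmaceuticals".toList), ("pharmacy".toList, "pharmaceuticals".toList), ("t d l".toList, "TCS".toList), ("t d c".toList, "TCS".toList)] []
    (by decide) (by decide) (by decide) (by decide) (by decide) (by decide) (by decide) s
  simpa only [List.cons_append, List.nil_append] using h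

theorem pvStep9 : ∀ s, pvScan [("natural data".toList, "financial data".toList), ("pharmacies".toList, "pharmaceuticals".toList), ("pharmacy".toList, "pharmaceuticals".toList), ("t d l".toList, "TCS".toList), ("t d c".toList, "TCS".toList)] s
    = pvScan [("natural data".toList, "financial data".toList), ("pharmacies".toList, "pharmaceuticals".toList), ("pharmacy".toList, "pharmaceuticals".toList), ("t d c".toList, "TCS".toList)] (pvRepl "t d l".toList "TCS".toList s) := by
  intro s
  have h := pvFuse "t d l".toList "TCS".toList [("natural data".toList, "financial data".toList), ("pharmacies".toList, "pharmaceuticals".toList), ("pharmacy".toList, "pharmaceuticals".toList)] [("t d c".toList, "TCS".toList)]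
    (by decide) (by decide) (by decide) (by decide) (by decide) (by decide) (by decide) s
  simpa only [List.cons_append, List.nil_append] using h

theorem pvStep10 : ∀ s, pvScan [("natural data".toList, "financial data".toList), ("pharmacies".toList, "pharmaceuticals".toList), ("pharmacy".toList, "pharmaceuticals".toList), ("t d c".toList, "TCS".toList)] s
    = pvScan [("natural data".toList, "financial data".toList), ("pharmacies".toList, "pharmaceuticals".toList), ("pharmacy".toList, "pharmaceuticals".toList)] (pvRepl "t d c".toList "TCS".toList s) := by
  intro s
  have h := pvFuse "t d c".toList "TCS".toList [("natural data".toList, "financial data".toList), ("pharmacies".toList, "pharmaceuticals".toList), ("pharmacy".toList, "pharmaceuticals".toList)] []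
    (by decide) (by decide) (by decide) (by decide) (by decide) (by decide) (by decide) s
  simpa only [List.cons_append, List.nil_append] using h

theorem pvStep11 : ∀ s, pvScan [("natural data".toList, "financial data".toList), ("pharmacies".toList, "pharmaceuticals".toList), ("pharmacy".toList, "pharmaceuticals".toList)] s
    = pvScan [("pharmacies".toList, "pharmaceuticals".toList), ("pharmacy".toList, "pharmaceuticals".toList)] (pvRepl "natural data".toList "financial data".toList s) := by
  intro s
  have h := pvFuse "natural data".toList "financial data".toList [] [("pharmacies".toList, "pharmaceuticals".toList), ("pharmacy".toList, "pharmaceuticals".toList)]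
    (by decide) (by decide) (by decide) (by decide) (by decide) (by decide) (by decide) s
  simpa only [List.cons_append, List.nil_append] using h

theorem pvStep12 : ∀ s, pvScan [("pharmacies".toList, "pharmaceuticals".toList), ("pharmacy".toList, "pharmaceuticals".toList)] s
    = pvScan [("pharmacy".toList, "pharmaceuticals".toList)] (pvRepl "pharmacies".toList "pharmaceuticals".toList s) := by
  intro s
  have h := pvFuse "pharmacies".toList "pharmaceuticals".toList [] [("pharmacy".toList, "pharmaceuticals".toList)]
    (by decide) (by decide) (by decide) (by decide) (by decide) (by decide) (by decide) s
  simpa only [List.cons_append, List.nil_append] using h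

theorem pvStep13 : ∀ s, pvScan [("pharmacy".toList, "pharmaceuticals".toList)] s
    = pvScan [] (pvRepl "pharmacy".toList "pharmaceuticals".toList s) := by
  intro s
  have h := pvFuse "pharmacy".toList "pharmaceuticals".toList [] []
    (by decide) (by decide) (by decide) (by decide) (by decide) (by decide) (by decide) s
  simpa only [List.cons_append, List.nil_append] using h

-- A's thirteen replace passes, fused one by one into the single scan
theorem pvChainScan : ∀ l : List Char, pvScan [("natural data".toList, "financial data".toList), ("in-courses".toList, "Infosys".toList), ("in courses".toList, "Infosys".toList), ("pharmacies".toList, "pharmaceuticals".toList), ("enforcers".toList, "Infosys".toList), ("infusions".toList, "Infosys".toList), ("enforcer".toList, "Infosys".toList), ("infusion".toList, "Infosys".toList), ("pharmacy".toList, "pharmaceuticals".toList), ("t d l".toList, "TCS".toList), ("t d c".toList, "TCS".toList), ("tdl".toList, "TCS".toList), ("tdc".toList, "TCS".toList)] l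
    = List.foldl (fun x kv => pvRepl kv.1 kv.2 x) l
        (pvBPairs.map (fun kv => (kv.1.toList, kv.2.toList))) := by
  intro l
  simp only [pvBPairs, List.map_cons, List.map_nil, List.foldl_cons, List.foldl_nil]
  rw [pvStep1, pvStep2, pvStep3, pvStep4, pvStep5, pvStep6, pvStep7, pvStep8, pvStep9, pvStep10, pvStep11, pvStep12, pvStep13, pvScan_nil_keys]

-- one guarded str.replace pass of A, on the character level
theorem pvStepA (kv : String × String) (hk : kv.1.toList ≠ []) (s : String) :
    (if PySem.Str.isIn kv.1 s then PySem.Str.replace s kv.1 kv.2 else s).toList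
      = pvRepl kv.1.toList kv.2.toList s.toList := by
  by_cases hin : PySem.Str.isIn kv.1 s = true
  · rw [if_pos hin, PySem.Str.toList_replace]
    exact pvRepl_eq_replace _ _ hk _
  · rw [if_neg hin]
    refine (pvRepl_of_not_infix ?_).symm
    rw [← PySem.Str.isIn_iff_infix]
    simpa using hin

theorem pvFoldA : ∀ (ps : List (String × String)), (∀ p ∈ ps, p.1.toList ≠ []) → ∀ s : String,
    (List.foldl (fun lt kv => if PySem.Str.isIn kv.1 lt then PySem.Str.replace lt kv.1 kv.2 else lt)
        s ps).toList
      = List.foldl (fun x kv => pvRepl kv.1 kv.2 x) s.toList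
          (ps.map (fun kv => (kv.1.toList, kv.2.toList))) := by
  intro ps
  induction ps with
  | nil => intro _ s; simp
  | cons p ps ih =>
    intro h s
    simp only [List.foldl_cons, List.map_cons]
    rw [← pvStepA p (h p (by simp)) s]
    exact ih (fun q hq => h q (by simp [hq])) _

def pvSortedPairs : List (String × String) := [
 ("natural data","financial data"), ("in-courses","Infosys"), ("in courses","Infosys"),
 ("pharmacies","pharmaceuticals"), ("enforcers","Infosys"), ("infusions","Infosys"),
 ("enforcer","Infosys"), ("infusion","Infosys"), ("pharmacy","pharmaceuticals"),
 ("t d l","TCS"), ("t d c","TCS"), ("tdl","TCS"), ("tdc","TCS")]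

-- ===== VERDICT (by name: the statement is the Claim_ definition above) =====
theorem correct_transcription_spec : Claim_equal_correct_transcription := by
  intro text _
  unfold Spec_correct_transcription
  simp only [correct_transcription, correct_transcription_alt]
  have hitems : (PySem.Dict.ofList pvAPairs).items = pvBPairs := by decide
  have hsorted : PySem.List.sorted (PySem.Dict.ofList pvBPairs).items
      (fun kv => PySem.Str.len kv.1) true = pvSortedPairs := by decide
  have hmap : pvSortedPairs.map (fun kv => (kv.1.toList, kv.2.toList))
      = [("natural data".toList, "financial data".toList), ("in-courses".toList, "Infosys".toList), ("in courses".toList, "Infosys".toList), ("pharmacies".toList, "pharmaceuticals".toList), ("enforcers".toList, "Infosys".toList), ("infusions".toList, "Infosys".toList), ("enforcer".toList, "Infosys".toList), ("infusion".toList, "Infosys".toList), ("pharmacy".toList, "pharmaceuticals".toList), ("t d l".toList, "TCS".toList), ("t d c".toList, "TCS".toList), ("tdl".toList, "TCS".toList), ("tdc".toList, "TCS".toList)] := by decide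
  rw [hitems, hsorted, hmap]
  unfold pvCapStr
  have hT : ∀ l : List Char, (String.ofList l).toList = l := by intro l; simp
  rw [hT]
  refine congrArg (fun l => String.ofList (pvCapChars l)) ?_
  rw [pvFoldA pvBPairs (by decide) (PySem.Str.lower text)]
  exact (pvChainScan (PySem.Str.lower text).toList).symm
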